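-- pv_equiv track=rewrite | github.com/synard1/Imagestro-PACS | fullstack-orthanc-dicom/pacs-service/app/services/hl7_adt_handler.py | _restructure_for_fhir
-- ===== SOURCE A (Python) =====
-- from typing import Dict, Any, Optional, Tuple
--
-- def _restructure_for_fhir(message_data: Dict[str, Any]) -> Dict[str, Any]:
--     """
--     Restructure flattened message data into segmented format for FHIR converter
--
--     Args:
--         message_data: Flattened message data from HL7 parser
--
--     Returns:
--         Segmented data structure expected by FHIR converter
--     """
--     restructured = {}
--
--     # PID Segment - Patient Identification
--     pid_fields = {}
--     for key in ['patient_id', 'patient_mrn', 'patient_name', 'patient_birth_date',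
--                 'patient_gender', 'patient_address', 'patient_phone', 'patient_ssn']:
--         if key in message_data:
--             pid_fields[key] = message_data[key]
--
--     if pid_fields:
--         restructured['PID'] = pid_fields
--
--     # PV1 Segment - Patient Visit
--     pv1_fields = {}
--     for key in ['visit_id', 'visit_number', 'patient_class', 'admission_type',
--                 'assigned_patient_location', 'attending_doctor_id', 'attending_doctor_name']:
--         if key in message_data:
--             pv1_fields[key] = message_data[key]
--
--     if pv1_fields:
--         restructured['PV1'] = pv1_fields
--
--     # MSH Segment - Message Header (metadata)
--     msh_fields = {}
--     for key in ['message_type', 'message_trigger', 'message_control_id', 'message_version',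
--                 'sending_application', 'sending_facility', 'receiving_application',
--                 'receiving_facility', 'message_datetime']:
--         if key in message_data:
--             msh_fields[key] = message_data[key]
--
--     if msh_fields:
--         restructured['MSH'] = msh_fields
--
--     # EVN Segment - Event Type
--     evn_fields = {}
--     for key in ['event_occurred']:
--         if key in message_data:
--             evn_fields[key] = message_data[key]
--
--     if evn_fields:
--         restructured['EVN'] = evn_fields
--
--     return restructured
-- ===== SOURCE B (Python) =====
-- _SEGMENT_KEYS = [
--     ('PID', ['patient_id', 'patient_mrn', 'patient_name', 'patient_birth_date',
--              'patient_gender', 'patient_address', 'patient_phone', 'patient_ssn']),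
--     ('PV1', ['visit_id', 'visit_number', 'patient_class', 'admission_type',
--              'assigned_patient_location', 'attending_doctor_id', 'attending_doctor_name']),
--     ('MSH', ['message_type', 'message_trigger', 'message_control_id', 'message_version',
--              'sending_application', 'sending_facility', 'receiving_application',
--              'receiving_facility', 'message_datetime']),
--     ('EVN', ['event_occurred']),
-- ]
--
-- # reverse routing index: field key -> (global rank, segment name)
-- _ROUTE = {}
-- for _seg, _keys in _SEGMENT_KEYS:
--     for _key in _keys:
--         _ROUTE[_key] = (len(_ROUTE), _seg)
--
--
-- def _restructure_for_fhir(message_data):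
--     # one routing pass over the input, then order by the global field rank
--     hits = sorted(
--         ((_ROUTE[k][0], _ROUTE[k][1], k, v)
--          for k, v in message_data.items() if k in _ROUTE),
--         key=lambda t: t[0])
--     out = {}
--     for _rank, seg, k, v in hits:
--         fields = out.get(seg, {})
--         fields[k] = v
--         out[seg] = fields
--     return out
-- ===== Notes on version B (the rewrite author's own statement) =====
-- stated objective: alternative
-- what changed: Instead of four fixed-list membership scans that build each segment dict in turn, B builds a reverse routing index (field key -> (global rank, segment)) once, makes a single routing pass over message_data, sorts the hits by global rank, and groups consecutive hits into their segment dicts, reproducing A's exact segment and field order.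
import Mathlib
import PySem

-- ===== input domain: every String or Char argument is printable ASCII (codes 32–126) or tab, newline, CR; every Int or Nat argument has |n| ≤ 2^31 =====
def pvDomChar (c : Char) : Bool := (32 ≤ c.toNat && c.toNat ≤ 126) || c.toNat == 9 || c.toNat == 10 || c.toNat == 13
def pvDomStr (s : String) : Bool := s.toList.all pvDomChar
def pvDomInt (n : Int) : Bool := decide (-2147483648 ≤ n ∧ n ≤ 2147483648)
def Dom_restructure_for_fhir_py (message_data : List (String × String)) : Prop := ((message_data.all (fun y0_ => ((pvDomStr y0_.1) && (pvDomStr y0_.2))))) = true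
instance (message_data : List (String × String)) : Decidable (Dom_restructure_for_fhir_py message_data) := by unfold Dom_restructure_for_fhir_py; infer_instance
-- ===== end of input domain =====

-- B replaces A's four fixed-list membership scans by one routing pass over the input plus a
-- rank sort and a grouping pass (objective: alternative structure, same result).

-- ===== PORT A =====
def pvPidKeys : List String :=
  ["patient_id", "patient_mrn", "patient_name", "patient_birth_date",
   "patient_gender", "patient_address", "patient_phone", "patient_ssn"]
def pvPv1Keys : List String :=
  ["visit_id", "visit_number", "patient_class", "admission_type",
   "assigned_patient_location", "attending_doctor_id", "attending_doctor_name"]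
def pvMshKeys : List String :=
  ["message_type", "message_trigger", "message_control_id", "message_version",
   "sending_application", "sending_facility", "receiving_application",
   "receiving_facility", "message_datetime"]
def pvEvnKeys : List String := ["event_occurred"]

-- the 'for key in [...]: if key in message_data: fields[key] = message_data[key]' loop of A
def pvSegFields (d : PySem.Dict String String) (ks : List String) : PySem.Dict String String :=
  ks.foldl (fun acc k => if d.contains k then acc.insert k (d.getD k "") else acc) PySem.Dict.empty

def restructure_for_fhir_py (message_data : List (String × String)) : List (String × List (String × String)) :=
  let d := PySem.Dict.ofList message_data
  let restructured : List (String × List (String × String)) := []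
  let pid := pvSegFields d pvPidKeys
  let restructured := if pid.items = [] then restructured else restructured ++ [("PID", pid.items)]
  let pv1 := pvSegFields d pvPv1Keys
  let restructured := if pv1.items = [] then restructured else restructured ++ [("PV1", pv1.items)]
  let msh := pvSegFields d pvMshKeys
  let restructured := if msh.items = [] then restructured else restructured ++ [("MSH", msh.items)]
  let evn := pvSegFields d pvEvnKeys
  let restructured := if evn.items = [] then restructured else restructured ++ [("EVN", evn.items)]
  restructured

-- ===== PORT B =====
-- Source B's module-level _ROUTE dict: field key -> (global rank, segment name)
def pvRoute : PySem.Dict String (Int × String) := PySem.Dict.ofList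
  [("patient_id", (0, "PID")), ("patient_mrn", (1, "PID")), ("patient_name", (2, "PID")),
   ("patient_birth_date", (3, "PID")), ("patient_gender", (4, "PID")),
   ("patient_address", (5, "PID")), ("patient_phone", (6, "PID")), ("patient_ssn", (7, "PID")),
   ("visit_id", (8, "PV1")), ("visit_number", (9, "PV1")), ("patient_class", (10, "PV1")),
   ("admission_type", (11, "PV1")), ("assigned_patient_location", (12, "PV1")),
   ("attending_doctor_id", (13, "PV1")), ("attending_doctor_name", (14, "PV1")),
   ("message_type", (15, "MSH")), ("message_trigger", (16, "MSH")),
   ("message_control_id", (17, "MSH")), ("message_version", (18, "MSH")),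
   ("sending_application", (19, "MSH")), ("sending_facility", (20, "MSH")),
   ("receiving_application", (21, "MSH")), ("receiving_facility", (22, "MSH")),
   ("message_datetime", (23, "MSH")), ("event_occurred", (24, "EVN"))]

def restructure_for_fhir_py_alt (message_data : List (String × String)) : List (String × List (String × String)) :=
  let d := PySem.Dict.ofList message_data
  let hits := d.items.filterMap (fun p => (pvRoute.get? p.1).map (fun rs => (rs.1, rs.2, p.1, p.2)))
  let hits := PySem.List.sorted hits (fun t => t.1) false
  let out := hits.foldl
    (fun (out : PySem.Dict String (PySem.Dict String String)) t =>
      out.insert t.2.1 ((out.getD t.2.1 PySem.Dict.empty).insert t.2.2.1 t.2.2.2))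
    PySem.Dict.empty
  out.items.map (fun p => (p.1, p.2.items))

-- ===== PRECONDITION & SPEC =====
def Spec_restructure_for_fhir_py (message_data : List (String × String)) (out : List (String × List (String × String))) : Prop := out = restructure_for_fhir_py_alt message_data
instance (message_data : List (String × String)) (out : List (String × List (String × String))) : Decidable (Spec_restructure_for_fhir_py message_data out) := by unfold Spec_restructure_for_fhir_py; infer_instance

-- ===== CLAIM (what is proved, stated in full; the proofs are below) =====
def Claim_equal_restructure_for_fhir_py : Prop := ∀ (message_data : List (String × String)), Dom_restructure_for_fhir_py message_data → Spec_restructure_for_fhir_py message_data (restructure_for_fhir_py message_data)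

-- ===== LEMMAS AND PROOFS =====

-- proof-side canonical objects
def pvE (s : String) (r0 : Int) (ks : List String) : List (Int × String × String) :=
  (PySem.List.enumerate ks r0).map (fun p => (p.1, s, p.2))

def pvEnum : List (Int × String × String) :=
  pvE "PID" 0 pvPidKeys ++ pvE "PV1" 8 pvPv1Keys ++ pvE "MSH" 15 pvMshKeys ++ pvE "EVN" 24 pvEvnKeys

def pvFB (d : PySem.Dict String String) (e : Int × String × String) :
    Option (Int × String × String × String) :=
  (d.get? e.2.2).map (fun v => (e.1, e.2.1, e.2.2, v))

def pvFields (d : PySem.Dict String String) (ks : List String) : List (String × String) :=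
  ks.filterMap (fun k => (d.get? k).map (fun v => (k, v)))

def pvStep (out : PySem.Dict String (PySem.Dict String String))
    (t : Int × String × String × String) : PySem.Dict String (PySem.Dict String String) :=
  out.insert t.2.1 ((out.getD t.2.1 PySem.Dict.empty).insert t.2.2.1 t.2.2.2)

theorem pvRoute_eq_mk :
    pvRoute = PySem.Dict.mk (pvEnum.map (fun e => (e.2.2, (e.1, e.2.1)))) := by
  decide


theorem pvRouteChar (l : List (Int × String × String))
    (hnd : (l.map (fun e => e.2.2)).Nodup) (k : String) (r : Int) (s : String) :
    (PySem.Dict.mk (l.map (fun e => (e.2.2, (e.1, e.2.1))))).get? k = some (r, s) ↔ (r, s, k) ∈ l := by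
  induction l with
  | nil => simp [PySem.Dict.get?]
  | cons e t ih =>
    rcases List.nodup_cons.mp hnd with ⟨hne, hnd'⟩
    simp only [List.map_cons]
    rw [PySem.Dict.get?_mk_cons]
    by_cases h : e.2.2 = k
    · subst h
      rw [if_pos (by simp)]
      constructor
      · intro heq
        have h2 : (e.1, e.2.1) = (r, s) := by injection heq
        obtain ⟨e1, e2, e3⟩ := e
        simp only [Prod.mk.injEq] at h2
        obtain ⟨hr, hs⟩ := h2
        subst hr; subst hs
        exact List.mem_cons_self
      · intro hmem
        rcases List.mem_cons.mp hmem with heq | hmem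
        · obtain ⟨e1, e2, e3⟩ := e
          simp_all
        · exact absurd (List.mem_map.mpr ⟨(r, s, e.2.2), hmem, rfl⟩) hne
    · rw [if_neg (by simpa using fun hh => h hh)]
      rw [ih hnd']
      constructor
      · intro hmem; exact List.mem_cons_of_mem _ hmem
      · intro hmem
        rcases List.mem_cons.mp hmem with heq | hmem
        · exact absurd (congrArg (fun x => x.2.2) heq).symm h
        · exact hmem


theorem pvPairwiseFilterMap {α β : Type} (l : List α) (f : α → Option β)
    (k1 : α → Int) (k2 : β → Int)
    (hl : l.Pairwise (fun a b => k1 a < k1 b))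
    (hf : ∀ a b, f a = some b → k2 b = k1 a) :
    (l.filterMap f).Pairwise (fun a b => k2 a < k2 b) := by
  induction l with
  | nil => simp
  | cons a t ih =>
    rcases List.pairwise_cons.mp hl with ⟨ha, ht⟩
    rw [List.filterMap_cons]
    cases hfa : f a with
    | none => exact ih ht
    | some b =>
      refine List.pairwise_cons.mpr ⟨?_, ih ht⟩
      intro y hy
      obtain ⟨a', ha', hfa'⟩ := List.mem_filterMap.mp hy
      rw [hf a b hfa, hf a' y hfa']
      exact ha a' ha'


theorem pvNodupMapFilterMap {α β γ : Type} (l : List α) (f : α → Option β)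
    (h : α → γ) (g : β → γ)
    (hnd : (l.map h).Nodup) (hf : ∀ a b, f a = some b → g b = h a) :
    ((l.filterMap f).map g).Nodup := by
  induction l with
  | nil => simp
  | cons a t ih =>
    rcases List.nodup_cons.mp hnd with ⟨hna, hndt⟩
    rw [List.filterMap_cons]
    cases hfa : f a with
    | none => exact ih hndt
    | some b =>
      rw [List.map_cons]
      refine List.nodup_cons.mpr ⟨?_, ih hndt⟩
      intro hmem
      obtain ⟨y, hy, hgy⟩ := List.mem_map.mp hmem
      obtain ⟨a', ha', hfa'⟩ := List.mem_filterMap.mp hy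
      apply hna
      have : h a' = h a := by rw [← hf a' y hfa', hgy, hf a b hfa]
      exact List.mem_map.mpr ⟨a', ha', this⟩


theorem pvSegItems (d : PySem.Dict String String) (ks : List String) (hnd : ks.Nodup)
    (acc : PySem.Dict String String) (hacc : ∀ k ∈ ks, acc.contains k = false) :
    (ks.foldl (fun acc k => if d.contains k then acc.insert k (d.getD k "") else acc) acc).items
      = acc.items ++ pvFields d ks := by
  induction ks generalizing acc with
  | nil => simp [pvFields]
  | cons k t ih =>
    rcases List.nodup_cons.mp hnd with ⟨hkt, hndt⟩
    simp only [List.foldl_cons]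
    cases hc : d.contains k with
    | false =>
      have hg : d.get? k = none := by
        rw [PySem.Dict.get?_eq_none_iff_contains]
        exact hc
      rw [if_neg (by exact Bool.false_ne_true)]
      rw [ih hndt acc (fun k' hk' => hacc k' (List.mem_cons_of_mem _ hk'))]
      simp [pvFields, hg]
    | true =>
      obtain ⟨v, hv⟩ : ∃ v, d.get? k = some v := by
        have h1 := PySem.Dict.contains_eq_isSome_get? (d := d) (k := k)
        rw [hc] at h1
        exact Option.isSome_iff_exists.mp h1.symm
      have hgd : d.getD k "" = v := PySem.Dict.getD_of_get?_eq_some d "" hv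
      have hacck : acc.contains k = false := hacc k (List.mem_cons_self)
      rw [if_pos rfl]
      rw [ih hndt (acc.insert k (d.getD k "")) ?_]
      · rw [PySem.Dict.items_insert_of_not_contains _ _ hacck]
        simp [pvFields, hv, hgd]
      · intro k' hk'
        have hne : k' ≠ k := fun h => hkt (h ▸ hk')
        rw [PySem.Dict.contains_insert]
        simp [hne, hacc k' (List.mem_cons_of_mem _ hk')]


theorem pvBlockFold (s : String) (es : List (Int × String × String × String))
    (hs : ∀ t ∈ es, t.2.1 = s) (out : PySem.Dict String (PySem.Dict String String)) :
    es.foldl pvStep out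
      = if es = [] then out
        else out.insert s
          (es.foldl (fun sd t => sd.insert t.2.2.1 t.2.2.2) (out.getD s PySem.Dict.empty)) := by
  induction es generalizing out with
  | nil => simp
  | cons t ts ih =>
    have hts : t.2.1 = s := hs t (List.mem_cons_self)
    rw [if_neg (by simp)]
    simp only [List.foldl_cons]
    rw [ih (fun u hu => hs u (List.mem_cons_of_mem _ hu)) (pvStep out t)]
    by_cases hE : ts = []
    · subst hE
      simp [pvStep, hts]
    · rw [if_neg hE]
      simp only [pvStep, hts]
      rw [PySem.Dict.getD_insert_self, PySem.Dict.insert_insert_self]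


theorem pvChainFold (bs : List (String × List (Int × String × String × String)))
    (out : PySem.Dict String (PySem.Dict String String))
    (hseg : ∀ b ∈ bs, ∀ t ∈ b.2, t.2.1 = b.1)
    (hnd : (out.keys ++ bs.map (fun b => b.1)).Nodup) :
    (bs.foldl (fun o b => b.2.foldl pvStep o) out).items
      = out.items ++ (bs.filter (fun b => !b.2.isEmpty)).map
          (fun b => (b.1, b.2.foldl (fun sd t => sd.insert t.2.2.1 t.2.2.2) PySem.Dict.empty)) := by
  induction bs generalizing out with
  | nil => simp
  | cons b rest ih =>
    obtain ⟨s, es⟩ := b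
    simp only [List.foldl_cons, List.map_cons] at *
    rw [pvBlockFold s es (hseg (s, es) (List.mem_cons_self)) out]
    by_cases hE : es = []
    · subst hE
      rw [if_pos rfl]
      rw [ih out (fun b hb => hseg b (List.mem_cons_of_mem _ hb))
        (hnd.sublist ((List.sublist_cons_self _ _).append_left _))]
      simp
    · rw [if_neg hE]
      have hsmem : s ∉ out.keys := by
        rcases List.nodup_append.mp hnd with ⟨_, _, hdisj⟩
        intro hmem
        exact hdisj s hmem s List.mem_cons_self rfl
      have hscont : out.contains s = false := by
        rw [← Bool.not_eq_true]
        rw [PySem.Dict.contains_iff_mem_keys]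
        exact hsmem
      rw [PySem.Dict.getD_of_not_contains _ _ hscont]
      rw [ih (out.insert s (es.foldl (fun sd t => sd.insert t.2.2.1 t.2.2.2) PySem.Dict.empty)) ?_ ?_]
      · rw [PySem.Dict.items_insert_of_not_contains _ _ hscont]
        have hbe : (!es.isEmpty) = true := by simp [hE]
        simp [hbe, List.append_assoc]
      · exact fun b hb => hseg b (List.mem_cons_of_mem _ hb)
      · rw [PySem.Dict.keys_insert_of_not_contains _ _ hscont]
        have h2 : out.keys ++ s :: List.map (fun b => b.1) rest
            = (out.keys ++ [s]) ++ List.map (fun b => b.1) rest := by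
          simp
        rw [← h2]
        exact hnd


theorem pvSortedHits (d : PySem.Dict String String) (hk : d.keys.Nodup) :
    PySem.List.sorted
      (d.items.filterMap (fun p => (pvRoute.get? p.1).map (fun rs => (rs.1, rs.2, p.1, p.2))))
      (fun t => t.1) false
      = pvEnum.filterMap (pvFB d) := by
  have hndEnum1 : (pvEnum.map (fun e => e.1)).Nodup := by decide
  have hndEnum2 : (pvEnum.map (fun e => e.2.2)).Nodup := by decide
  have hitems : d.items.map (fun p => p.1) = d.keys := rfl
  apply PySem.List.sorted_eq_of_perm_of_pairwise_lt
  · rw [List.perm_ext_iff_of_nodup]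
    · intro t
      constructor
      · intro ht
        obtain ⟨e, he, hfe⟩ := List.mem_filterMap.mp ht
        obtain ⟨v, hv, hvt⟩ := Option.map_eq_some_iff.mp (hfe : pvFB d e = some t)
        subst hvt
        refine List.mem_filterMap.mpr ⟨(e.2.2, v), PySem.Dict.mem_items_of_get?_eq_some d hv, ?_⟩
        have hr : pvRoute.get? e.2.2 = some (e.1, e.2.1) := by
          rw [pvRoute_eq_mk, pvRouteChar pvEnum hndEnum2]
          simpa using he
        simp [hr]
      · intro ht
        obtain ⟨p, hp, hfp⟩ := List.mem_filterMap.mp ht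
        obtain ⟨rs, hrs, hrst⟩ := Option.map_eq_some_iff.mp hfp
        subst hrst
        rw [pvRoute_eq_mk, pvRouteChar pvEnum hndEnum2] at hrs
        refine List.mem_filterMap.mpr ⟨(rs.1, rs.2, p.1), hrs, ?_⟩
        have hv : d.get? p.1 = some p.2 :=
          (PySem.Dict.get?_eq_some_iff_mem_items d p.1 p.2 hk).mpr hp
        simp [pvFB, hv]
    · exact List.Nodup.of_map (f := fun t => t.1)
        (pvNodupMapFilterMap pvEnum (pvFB d) (fun e => e.1) (fun t => t.1) hndEnum1
          (fun a b hab => by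
            obtain ⟨v, _, hvb⟩ := Option.map_eq_some_iff.mp hab
            subst hvb; rfl))
    · exact List.Nodup.of_map (f := fun t => t.2.2.1)
        (pvNodupMapFilterMap d.items
          (fun p => (pvRoute.get? p.1).map (fun rs => (rs.1, rs.2, p.1, p.2)))
          (fun p => p.1) (fun t => t.2.2.1) (hitems ▸ hk)
          (fun a b hab => by
            obtain ⟨rs, _, hrsb⟩ := Option.map_eq_some_iff.mp hab
            subst hrsb; rfl))
  · exact pvPairwiseFilterMap pvEnum (pvFB d) (fun e => e.1) (fun t => t.1)
      (by decide)
      (fun a b hab => by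
        obtain ⟨v, _, hvb⟩ := Option.map_eq_some_iff.mp hab
        subst hvb; rfl)


theorem pvBlockProj (d : PySem.Dict String String) (s : String) (r0 : Int) (ks : List String) :
    ((pvE s r0 ks).filterMap (pvFB d)).map (fun t => (t.2.2.1, t.2.2.2)) = pvFields d ks := by
  simp only [pvE, pvFB, pvFields, List.map_filterMap, List.filterMap_map]
  conv_rhs => rw [← PySem.List.map_snd_enumerate ks r0]
  rw [List.filterMap_map]
  apply List.filterMap_congr
  intro p _
  cases h : d.get? p.2 <;> simp [h, Function.comp]


theorem pvBlockSeg (d : PySem.Dict String String) (s : String) (r0 : Int) (ks : List String) :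
    ∀ t ∈ (pvE s r0 ks).filterMap (pvFB d), t.2.1 = s := by
  intro t ht
  obtain ⟨e, he, hfe⟩ := List.mem_filterMap.mp ht
  obtain ⟨p, _, hpe⟩ := List.mem_map.mp he
  obtain ⟨v, _, hvt⟩ := Option.map_eq_some_iff.mp hfe
  subst hvt
  rw [← hpe]


theorem pvBlockKeysNodup (d : PySem.Dict String String) (s : String) (r0 : Int)
    (ks : List String) (hnd : ks.Nodup) :
    (((pvE s r0 ks).filterMap (pvFB d)).map (fun t => t.2.2.1)).Nodup := by
  apply pvNodupMapFilterMap (pvE s r0 ks) (pvFB d) (fun e => e.2.2) (fun t => t.2.2.1)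
  · have h1 : (pvE s r0 ks).map (fun e => e.2.2) = ks := by
      simp only [pvE, List.map_map]
      have : ((fun (e : Int × String × String) => e.2.2) ∘ fun p : Int × String => (p.1, s, p.2))
          = fun p : Int × String => p.2 := rfl
      rw [this]
      exact PySem.List.map_snd_enumerate ks r0
    rw [h1]
    exact hnd
  · intro a b hab
    obtain ⟨v, _, hvb⟩ := Option.map_eq_some_iff.mp hab
    subst hvb
    rfl


-- ===== VERDICT (by name: the statement is the Claim_ definition above) =====
theorem restructure_for_fhir_py_spec : Claim_equal_restructure_for_fhir_py := by
  intro md _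
  unfold Spec_restructure_for_fhir_py restructure_for_fhir_py restructure_for_fhir_py_alt
  simp only []
  have hk : (PySem.Dict.ofList md).keys.Nodup := PySem.Dict.nodup_keys_ofList md
  rw [pvSortedHits (PySem.Dict.ofList md) hk]
  have hsplit : pvEnum.filterMap (pvFB (PySem.Dict.ofList md))
      = (pvE "PID" 0 pvPidKeys).filterMap (pvFB (PySem.Dict.ofList md))
        ++ ((pvE "PV1" 8 pvPv1Keys).filterMap (pvFB (PySem.Dict.ofList md))
        ++ ((pvE "MSH" 15 pvMshKeys).filterMap (pvFB (PySem.Dict.ofList md))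
        ++ (pvE "EVN" 24 pvEvnKeys).filterMap (pvFB (PySem.Dict.ofList md)))) := by
    simp [pvEnum, List.filterMap_append]
  rw [hsplit]
  have hstep : (fun (out : PySem.Dict String (PySem.Dict String String))
      (t : Int × String × String × String) =>
      out.insert t.2.1 ((out.getD t.2.1 PySem.Dict.empty).insert t.2.2.1 t.2.2.2)) = pvStep := rfl
  rw [hstep]
  rw [List.foldl_append, List.foldl_append, List.foldl_append]
  have hchain := pvChainFold
    [("PID", (pvE "PID" 0 pvPidKeys).filterMap (pvFB (PySem.Dict.ofList md))),
     ("PV1", (pvE "PV1" 8 pvPv1Keys).filterMap (pvFB (PySem.Dict.ofList md))),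
     ("MSH", (pvE "MSH" 15 pvMshKeys).filterMap (pvFB (PySem.Dict.ofList md))),
     ("EVN", (pvE "EVN" 24 pvEvnKeys).filterMap (pvFB (PySem.Dict.ofList md)))]
    PySem.Dict.empty
    (by
      intro b hb
      rcases List.mem_cons.mp hb with h | hb
      · subst h; exact pvBlockSeg _ _ _ _
      rcases List.mem_cons.mp hb with h | hb
      · subst h; exact pvBlockSeg _ _ _ _
      rcases List.mem_cons.mp hb with h | hb
      · subst h; exact pvBlockSeg _ _ _ _
      rcases List.mem_cons.mp hb with h | hb
      · subst h; exact pvBlockSeg _ _ _ _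
      · simp at hb)
    (by exact (by decide : ((["PID", "PV1", "MSH", "EVN"] : List String)).Nodup))
  simp only [List.foldl_cons, List.foldl_nil] at hchain
  rw [hchain]
  -- A-side segment field dicts
  have hA : ∀ ks : List String, ks.Nodup →
      (pvSegFields (PySem.Dict.ofList md) ks).items = pvFields (PySem.Dict.ofList md) ks := by
    intro ks h
    unfold pvSegFields
    rw [pvSegItems (PySem.Dict.ofList md) ks h PySem.Dict.empty
      (fun k _ => PySem.Dict.contains_empty k)]
    rfl
  rw [hA pvPidKeys (by decide), hA pvPv1Keys (by decide), hA pvMshKeys (by decide),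
    hA pvEvnKeys (by decide)]
  -- B-side per-block field dicts
  have hI : ∀ (s : String) (r0 : Int) (ks : List String), ks.Nodup →
      (((pvE s r0 ks).filterMap (pvFB (PySem.Dict.ofList md))).foldl
          (fun sd t => sd.insert t.2.2.1 t.2.2.2) PySem.Dict.empty).items
        = pvFields (PySem.Dict.ofList md) ks := by
    intro s r0 ks h
    have hfr := PySem.Dict.items_foldl_insert_fresh
      ((pvE s r0 ks).filterMap (pvFB (PySem.Dict.ofList md)))
      (fun t => t.2.2.1) (fun t => t.2.2.2) PySem.Dict.empty
      (fun a _ => PySem.Dict.contains_empty _)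
      (pvBlockKeysNodup (PySem.Dict.ofList md) s r0 ks h)
    exact hfr.trans (by simpa using pvBlockProj (PySem.Dict.ofList md) s r0 ks)
  have hEq : ∀ (s : String) (r0 : Int) (ks : List String),
      ((pvE s r0 ks).filterMap (pvFB (PySem.Dict.ofList md)) = []
        ↔ pvFields (PySem.Dict.ofList md) ks = []) := by
    intro s r0 ks
    rw [← pvBlockProj (PySem.Dict.ofList md) s r0 ks]
    exact (List.map_eq_nil_iff).symm
  have hie : (PySem.Dict.empty : PySem.Dict String (PySem.Dict String String)).items = [] := rfl
  have hb : ∀ (s : String) (r0 : Int) (ks : List String),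
      ((pvE s r0 ks).filterMap (pvFB (PySem.Dict.ofList md))).isEmpty
        = decide (pvFields (PySem.Dict.ofList md) ks = []) := by
    intro s r0 ks
    by_cases h : pvFields (PySem.Dict.ofList md) ks = []
    · simp [h, (hEq s r0 ks).mpr h]
    · have hne : (pvE s r0 ks).filterMap (pvFB (PySem.Dict.ofList md)) ≠ [] :=
        fun hc => h ((hEq s r0 ks).mp hc)
      simp [h, hne]
  simp only [List.filter_cons, List.filter_nil, hb, hie]
  by_cases h1 : pvFields (PySem.Dict.ofList md) pvPidKeys = [] <;>
  by_cases h2 : pvFields (PySem.Dict.ofList md) pvPv1Keys = [] <;>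
  by_cases h3 : pvFields (PySem.Dict.ofList md) pvMshKeys = [] <;>
  by_cases h4 : pvFields (PySem.Dict.ofList md) pvEvnKeys = [] <;>
  simp [h1, h2, h3, h4, hI "PID" 0 pvPidKeys (by decide), hI "PV1" 8 pvPv1Keys (by decide),
    hI "MSH" 15 pvMshKeys (by decide), hI "EVN" 24 pvEvnKeys (by decide)]
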